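-- pv_equiv track=rewrite | github.com/ShepherdCode/ShepherdML | Nasa2021/PyORF.py | max_orfs_by_frame
-- ===== SOURCE A (Python) =====
-- import itertools
--
-- def chunkstring(string, length, frame=1):
--     frame = frame-1
--     string = string[frame::]
--     return list((string[0+i:length+i] for i in range(0, len(string), length)))
--
-- def find_codons(sequence, start_codon = "ATG", stop_codons = ("TAG", "TAA", "TGA")):
--   found_start = []
--   found_stop = []
--   in_sequence = False
--
--   for i in range(len(sequence)):
--     if sequence[i] == start_codon and not in_sequence:
--       found_start.append(i)
--       in_sequence = True
--     if sequence[i] in stop_codons and in_sequence: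
--       found_stop.append(i)
--       in_sequence = False
--   found_codons = list(itertools.zip_longest(found_start, found_stop))
--   return found_codons
--
-- def orf_length(pair):
--   if pair[1] is None:
--     return 0
--   else:
--     return pair[1] - pair[0]
--
-- def biggest_orf(orf_list, frame):
--   pair = max(orf_list, key=orf_length)
--   correct_pair = calculate_indexes(pair, frame)
--   pair = correct_pair
--   return (pair[1] - pair[0]+1), pair, frame
--
-- def calculate_indexes(pair, frame):
--   CODON = 3
--   EMPTY = (0,1)
--   if None in pair:
--     return EMPTY
--   if frame==1:
--     return (pair[0]*3+frame, pair[1]*3+CODON)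
--   if frame==2:
--     return (pair[0]*3+frame, pair[1]*3+1+CODON)
--   if frame==3:
--     return (pair[0]*3+frame, pair[1]*3+2+CODON)
--
-- def max_orf_by_frame(sequence, frame):
--   codon_list = chunkstring(sequence,3,frame)
--   orfs = find_codons(codon_list)
--   max_orf = biggest_orf(orfs, frame)
--   return max_orf
--
-- def max_orfs_by_frame(sequence):
--   frames_with_orfs = []
--   all_maxes = []
--   for i in range(1,4):
--     found_codons = find_codons(chunkstring(sequence, 3, i))
--     if found_codons:
--       frames_with_orfs.append(i)
--   for frame in frames_with_orfs:
--     all_maxes.append(max_orf_by_frame(sequence, frame))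
--   return all_maxes
-- ===== SOURCE B (Python) =====
-- def find_positions(codons, start_codon="ATG", stop_codons=("TAG", "TAA", "TGA")):
--     starts = [j for j, c in enumerate(codons) if c == start_codon]
--     stops = [j for j, c in enumerate(codons) if c in stop_codons]
--     return starts, stops
--
--
-- def pair_orfs(starts, stops):
--     # recursive merge of the two sorted index lists: each stop closes the
--     # earliest still-open start; a start with no later stop gives (start, None)
--     if not starts:
--         return []
--     if not stops:
--         return [(starts[0], None)]
--     s, p = starts[0], stops[0]
--     if p < s:
--         return pair_orfs(starts, stops[1:])
--     return [(s, p)] + pair_orfs([x for x in starts if x > p], stops[1:])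
--
--
-- def max_orfs_by_frame(sequence):
--     result = []
--     for frame in (1, 2, 3):
--         sub = sequence[frame - 1:]
--         codons = [sub[i:i + 3] for i in range(0, len(sub), 3)]
--         starts, stops = find_positions(codons)
--         orfs = pair_orfs(starts, stops)
--         if not orfs:
--             continue
--         best = max(orfs, key=lambda q: 0 if q[1] is None else q[1] - q[0])
--         if best[1] is None:
--             result.append((2, (0, 1), frame))
--         else:
--             lo = best[0] * 3 + frame
--             hi = best[1] * 3 + frame + 2
--             result.append((hi - lo + 1, (lo, hi), frame))
--     return result
-- ===== Notes on version B (the rewrite author's own statement) =====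
-- stated objective: alternative
-- what changed: A runs a stateful in_sequence toggle scan over the codons building two parallel index lists that it then zip_longests into option pairs; B instead extracts the start and stop index lists by comprehensions and pairs them with a recursive merge of the two sorted lists (each stop closes the earliest start after the previous stop, a leftover start pairs with None), then takes the max and applies the index arithmetic.
import Mathlib
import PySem

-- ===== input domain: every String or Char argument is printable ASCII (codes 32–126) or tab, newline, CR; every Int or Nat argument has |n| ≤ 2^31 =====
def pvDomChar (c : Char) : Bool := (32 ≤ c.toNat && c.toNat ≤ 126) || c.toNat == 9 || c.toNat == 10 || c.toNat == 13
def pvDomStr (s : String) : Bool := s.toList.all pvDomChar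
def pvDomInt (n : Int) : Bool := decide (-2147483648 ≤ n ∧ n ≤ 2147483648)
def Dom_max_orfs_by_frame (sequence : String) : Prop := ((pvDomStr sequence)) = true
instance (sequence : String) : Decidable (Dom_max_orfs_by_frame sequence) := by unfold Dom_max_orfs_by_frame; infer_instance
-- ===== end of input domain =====

-- B replaces A's stateful toggle scan + zip_longest by comprehension-extracted start/stop index
-- lists paired with a recursive merge of the two sorted lists; objective: alternative.

-- ===== PORT A =====

def pvStart : List Char := ['A', 'T', 'G']
def pvStops : List (List Char) := [['T','A','G'], ['T','A','A'], ['T','G','A']]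

-- chunkstring(string, length, frame)
def pvChunkstring (s : List Char) (length frame : Int) : List (List Char) :=
  let frame1 := frame - 1
  let str := PySem.List.slice s (some frame1) none
  (PySem.List.pyRange 0 (PySem.List.len str) length).map
    (fun i => PySem.List.slice str (some (0 + i)) (some (length + i)))

-- itertools.zip_longest(xs, ys) with fillvalue None
def pvZipLongest : List Int → List Int → List (Option Int × Option Int)
  | [], [] => []
  | [], y :: ys => (none, some y) :: pvZipLongest [] ys
  | x :: xs, [] => (some x, none) :: pvZipLongest xs []
  | x :: xs, y :: ys => (some x, some y) :: pvZipLongest xs ys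

-- the body of find_codons' for-loop (state = (found_start, found_stop, in_sequence))
def pvFindStep (st : List Int × List Int × Bool) (i : Int) (c : List Char) :
    List Int × List Int × Bool :=
  let st1 := if c = pvStart ∧ st.2.2 = false then (st.1 ++ [i], st.2.1, true) else st
  if c ∈ pvStops ∧ st1.2.2 = true then (st1.1, st1.2.1 ++ [i], false) else st1

-- find_codons(sequence)
def pvFindCodons (seqc : List (List Char)) : List (Option Int × Option Int) :=
  let st := (PySem.List.pyRange 0 (PySem.List.len seqc)).foldl
    (fun st i => pvFindStep st i (PySem.List.pyGetD seqc i [])) ([], [], false)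
  pvZipLongest st.1 st.2.1

-- orf_length(pair); pair[0] is None only together with pair[1] = None in A's data, so the
-- `.getD 0` in the subtraction is exact on every pair A ever feeds to it
def pvOrfLength (p : Option Int × Option Int) : Int :=
  match p.2 with
  | none => 0
  | some t => t - p.1.getD 0

-- calculate_indexes(pair, frame); the final (0,0) stands for Python's implicit None when
-- frame ∉ {1,2,3}, which A never reaches (frames are 1..3)
def pvCalcIndexes (p : Option Int × Option Int) (frame : Int) : Int × Int :=
  if p.1 = none ∨ p.2 = none then (0, 1)
  else
    let a := p.1.getD 0
    let b := p.2.getD 0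
    if frame = 1 then (a * 3 + frame, b * 3 + 3)
    else if frame = 2 then (a * 3 + frame, b * 3 + 1 + 3)
    else if frame = 3 then (a * 3 + frame, b * 3 + 2 + 3)
    else (0, 0)

-- biggest_orf(orf_list, frame); max([]) would raise, callers only pass non-empty lists,
-- so the `.getD (none, none)` default is never taken
def pvBiggestOrf (orfs : List (Option Int × Option Int)) (frame : Int) :
    Int × (Int × Int) × Int :=
  let pair := (PySem.List.max? orfs pvOrfLength).getD (none, none)
  let cp := pvCalcIndexes pair frame
  (cp.2 - cp.1 + 1, cp, frame)

def pvMaxOrfByFrame (s : List Char) (frame : Int) : Int × (Int × Int) × Int :=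
  pvBiggestOrf (pvFindCodons (pvChunkstring s 3 frame)) frame

def max_orfs_by_frame (sequence : String) : List (Int × (Int × Int) × Int) :=
  let s := sequence.toList
  let fwo := (PySem.List.pyRange 1 4).foldl
    (fun acc i => if pvFindCodons (pvChunkstring s 3 i) ≠ [] then acc ++ [i] else acc) []
  fwo.foldl (fun acc frame => acc ++ [pvMaxOrfByFrame s frame]) []

-- ===== PORT B =====

-- find_positions(codons): the two comprehensions over enumerate(codons)
def pvFindPositions (codons : List (List Char)) : List Int × List Int :=
  (((PySem.List.enumerate codons).filter (fun p => decide (p.2 = pvStart))).map Prod.fst,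
   ((PySem.List.enumerate codons).filter (fun p => decide (p.2 ∈ pvStops))).map Prod.fst)

-- pair_orfs(starts, stops): recursive merge of the two sorted index lists
def pvPairOrfs : List Int → List Int → List (Int × Option Int)
  | [], _ => []
  | s :: _, [] => [(s, none)]
  | s :: ss, p :: ps =>
      if p < s then pvPairOrfs (s :: ss) ps
      else (s, p) :: pvPairOrfs ((s :: ss).filter (fun x => decide (p < x))) ps
  termination_by _ stops => stops.length

-- B's max key: 0 if q[1] is None else q[1]-q[0]
def pvKeyB (q : Int × Option Int) : Int :=
  match q.2 with
  | none => 0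
  | some t => t - q.1

-- one frame of B's loop body; `none` is Python's `continue` (the `if not orfs` guard
-- and the guarded `max(orfs, …)` are rendered together as the match on max?)
def pvFrameB (s : List Char) (frame : Int) : Option (Int × (Int × Int) × Int) :=
  let sub := PySem.List.slice s (some (frame - 1)) none
  let codons := (PySem.List.pyRange 0 (PySem.List.len sub) 3).map
    (fun i => PySem.List.slice sub (some i) (some (i + 3)))
  let sp := pvFindPositions codons
  let orfs := pvPairOrfs sp.1 sp.2
  match PySem.List.max? orfs pvKeyB with
  | none => none
  | some best =>
      some (match best.2 with
        | none => (2, (0, 1), frame)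
        | some t =>
            let lo := best.1 * 3 + frame
            let hi := t * 3 + frame + 2
            (hi - lo + 1, (lo, hi), frame))

def max_orfs_by_frame_alt (sequence : String) : List (Int × (Int × Int) × Int) :=
  let s := sequence.toList
  ([1, 2, 3] : List Int).foldl (fun acc f => acc ++ (pvFrameB s f).toList) []

-- ===== PRECONDITION & SPEC =====
def Spec_max_orfs_by_frame (sequence : String) (out : List (Int × (Int × Int) × Int)) : Prop := out = max_orfs_by_frame_alt sequence
instance (sequence : String) (out : List (Int × (Int × Int) × Int)) : Decidable (Spec_max_orfs_by_frame sequence out) := by unfold Spec_max_orfs_by_frame; infer_instance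

-- ===== CLAIM (what is proved, stated in full; the proofs are below) =====
def Claim_equal_max_orfs_by_frame : Prop := ∀ (sequence : String), Dom_max_orfs_by_frame sequence → Spec_max_orfs_by_frame sequence (max_orfs_by_frame sequence)

-- ===== LEMMAS AND PROOFS =====

-- A's `for i in range(len(xs)): … xs[i] …` fold is the fold over the enumerated list
theorem pv_fold_range_enum {σ : Type} (g : σ → Int → List Char → σ) :
    ∀ (cs pre : List (List Char)) (init : σ),
      (PySem.List.pyRange (pre.length : Int) ((pre.length : Int) + cs.length)).foldl
        (fun st i => g st i (PySem.List.pyGetD (pre ++ cs) i [])) init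
      = (PySem.List.enumerate cs (pre.length : Int)).foldl
          (fun st p => g st p.1 p.2) init := by
  intro cs
  induction cs with
  | nil =>
      intro pre init
      simp [PySem.List.enumerate]
  | cons c cs ih =>
      intro pre init
      rw [PySem.List.pyRange_one_cons (by push_cast [List.length_cons]; omega)]
      simp only [List.foldl_cons]
      have h1 : PySem.List.pyGetD (pre ++ c :: cs) (pre.length : Int) [] = c := by
        rw [PySem.List.pyGetD_natCast]
        simp [List.getD]
      rw [h1]
      have h2 := ih (pre ++ [c]) (g init (pre.length : Int) c)
      simp only [List.length_append, List.length_cons, List.length_nil] at h2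
      push_cast at h2
      rw [show PySem.List.enumerate (c :: cs) (pre.length : Int)
            = ((pre.length : Int), c) :: PySem.List.enumerate cs ((pre.length : Int) + 1)
          from rfl]
      simp only [List.foldl_cons]
      rw [List.append_cons]
      simp only [List.length_cons]
      push_cast
      rw [show (pre.length : Int) + (cs.length + 1) = (pre.length + 1) + cs.length by ring]
      convert h2 using 3

theorem pv_fold_range_enum0 {σ : Type} (g : σ → Int → List Char → σ)
    (cs : List (List Char)) (init : σ) :
    (PySem.List.pyRange 0 (PySem.List.len cs)).foldl
      (fun st i => g st i (PySem.List.pyGetD cs i [])) init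
    = (PySem.List.enumerate cs).foldl (fun st p => g st p.1 p.2) init := by
  have h := pv_fold_range_enum g cs [] init
  simpa [PySem.List.len_eq] using h

-- shape of find_codons' zip_longest when |found_start| = |found_stop| + (0 or 1)
theorem pv_zipLongest_shape :
    ∀ (cl ft : List Int), cl.length = ft.length → ∀ (op : Option Int),
      pvZipLongest (cl ++ op.toList) ft
      = (cl.zip ft).map (fun p => ((some p.1, some p.2) : Option Int × Option Int))
        ++ op.toList.map (fun s => ((some s, none) : Option Int × Option Int)) := by
  intro cl
  induction cl with
  | nil =>
      intro ft h op
      have hft : ft = [] := by simpa using h.symm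
      subst hft
      cases op <;> simp [pvZipLongest]
  | cons x xs ih =>
      intro ft h op
      cases ft with
      | nil => simp at h
      | cons y ys =>
          simp only [List.length_cons] at h
          cases op with
          | none =>
              have h0 := ih ys (by omega) none
              simp only [Option.toList_none, List.append_nil, List.map_nil] at h0
              simp [pvZipLongest, h0]
          | some v =>
              have h1 := ih ys (by omega) (some v)
              simp only [Option.toList_some] at h1
              simp [pvZipLongest, h1]

-- the recursive reference semantics of A's toggle loop (state = the open start, if any)
def pvTgl : Option Int → List (Int × List Char) → List (Option Int × Option Int)
  | none, [] => []
  | some s0, [] => [(some s0, none)]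
  | none, (i, c) :: r => if c = pvStart then pvTgl (some i) r else pvTgl none r
  | some s0, (i, c) :: r =>
      if c ∈ pvStops then (some s0, some i) :: pvTgl none r else pvTgl (some s0) r

-- A's fold, started from any coupled state, produces pvTgl's pair list
theorem pv_fold_eq_tgl :
    ∀ (l : List (Int × List Char)) (fs0 ft : List Int) (opt : Option Int),
      fs0.length = ft.length →
      (let r := l.foldl (fun st p => pvFindStep st p.1 p.2)
          (fs0 ++ opt.toList, ft, opt.isSome);
       pvZipLongest r.1 r.2.1)
      = (fs0.zip ft).map (fun q => ((some q.1, some q.2) : Option Int × Option Int))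
        ++ pvTgl opt l := by
  intro l
  induction l with
  | nil =>
      intro fs0 ft opt h
      simp only [List.foldl_nil]
      rw [pv_zipLongest_shape fs0 ft h opt]
      cases opt <;> simp [pvTgl]
  | cons hd r ih =>
      intro fs0 ft opt h
      obtain ⟨i, c⟩ := hd
      simp only [List.foldl_cons]
      cases opt with
      | none =>
          simp only [Option.toList_none, Option.isSome_none, List.append_nil]
          by_cases hc : c = pvStart
          · subst hc
            have hns : pvStart ∉ pvStops := by decide
            have hstep : pvFindStep (fs0, ft, false) i pvStart = (fs0 ++ [i], ft, true) := by
              simp [pvFindStep, hns]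
            rw [hstep, show pvTgl none ((i, pvStart) :: r) = pvTgl (some i) r by
              simp [pvTgl]]
            have h1 := ih fs0 ft (some i) h
            simpa using h1
          · have hstep : pvFindStep (fs0, ft, false) i c = (fs0, ft, false) := by
              by_cases hcs : c ∈ pvStops <;> simp [pvFindStep, hc, hcs]
            rw [hstep, show pvTgl none ((i, c) :: r) = pvTgl none r by simp [pvTgl, hc]]
            have h1 := ih fs0 ft none h
            simpa using h1
      | some s0 =>
          simp only [Option.toList_some, Option.isSome_some]
          by_cases hcs : c ∈ pvStops
          · have hc : c ≠ pvStart := by rintro rfl; revert hcs; decide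
            have hstep : pvFindStep (fs0 ++ [s0], ft, true) i c
                = (fs0 ++ [s0], ft ++ [i], false) := by
              simp [pvFindStep, hc, hcs]
            rw [hstep, show pvTgl (some s0) ((i, c) :: r)
                  = (some s0, some i) :: pvTgl none r by simp [pvTgl, hcs]]
            have h1 := ih (fs0 ++ [s0]) (ft ++ [i]) none (by simp [h])
            rw [List.zip_append h] at h1
            simpa using h1
          · have hstep : pvFindStep (fs0 ++ [s0], ft, true) i c
                = (fs0 ++ [s0], ft, true) := by
              simp [pvFindStep, hcs]
            rw [hstep, show pvTgl (some s0) ((i, c) :: r) = pvTgl (some s0) r by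
              simp [pvTgl, hcs]]
            have h1 := ih fs0 ft (some s0) h
            simpa using h1

-- boxing an (Int × Option Int) pair into A's (Option Int × Option Int) shape
def pvBox (q : Int × Option Int) : Option Int × Option Int := (some q.1, q.2)

def pvStartsOf (l : List (Int × List Char)) : List Int :=
  (l.filter (fun p => decide (p.2 = pvStart))).map Prod.fst

def pvStopsOf (l : List (Int × List Char)) : List Int :=
  (l.filter (fun p => decide (p.2 ∈ pvStops))).map Prod.fst

-- pvTgl equals the recursive merge pvPairOrfs of the extracted index lists
theorem pv_tgl_pairs :
    ∀ (l : List (Int × List Char)),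
      l.Pairwise (fun a b => a.1 < b.1) →
      (pvTgl none l = (pvPairOrfs (pvStartsOf l) (pvStopsOf l)).map pvBox
       ∧ ∀ s0 : Int,
          pvTgl (some s0) l
          = (match pvStopsOf l with
            | [] => [(some s0, none)]
            | p :: ps =>
                (some s0, some p)
                  :: (pvPairOrfs ((pvStartsOf l).filter (fun x => decide (p < x))) ps).map pvBox)) := by
  intro l
  induction l with
  | nil =>
      intro _
      exact ⟨by simp [pvTgl, pvStartsOf, pvStopsOf, pvPairOrfs], fun s0 => by
        simp [pvTgl, pvStopsOf]⟩
  | cons hd r ih =>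
      intro hpw
      obtain ⟨i, c⟩ := hd
      rw [List.pairwise_cons] at hpw
      obtain ⟨hlt, hpw'⟩ := hpw
      obtain ⟨ihf, iht⟩ := ih hpw'
      have hstartsgt : ∀ x ∈ pvStartsOf r, i < x := by
        intro x hx
        obtain ⟨p, hp, hfst⟩ := List.mem_map.mp hx
        exact hfst ▸ hlt p (List.mem_of_mem_filter hp)
      have hstopsgt : ∀ x ∈ pvStopsOf r, i < x := by
        intro x hx
        obtain ⟨p, hp, hfst⟩ := List.mem_map.mp hx
        exact hfst ▸ hlt p (List.mem_of_mem_filter hp)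
      constructor
      · -- the not-in-sequence case
        by_cases hc : c = pvStart
        · have hcs : c ∉ pvStops := by subst hc; decide
          have hS : pvStartsOf ((i, c) :: r) = i :: pvStartsOf r := by simp [pvStartsOf, hc]
          have hP : pvStopsOf ((i, c) :: r) = pvStopsOf r := by simp [pvStopsOf, hcs]
          have hT : pvTgl none ((i, c) :: r) = pvTgl (some i) r := by simp [pvTgl, hc]
          rw [hT, hS, hP, iht i]
          cases hst : pvStopsOf r with
          | nil => simp [pvPairOrfs, pvBox]
          | cons p ps =>
              have hfi : ¬ p < i := by
                have := hstopsgt p (by rw [hst]; exact List.mem_cons_self); omega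
              have hred : pvPairOrfs (i :: pvStartsOf r) (p :: ps)
                  = (i, some p) :: pvPairOrfs
                      ((i :: pvStartsOf r).filter (fun x => decide (p < x))) ps := by
                simp [pvPairOrfs, hfi]
              have hflt : (i :: pvStartsOf r).filter (fun x => decide (p < x))
                  = (pvStartsOf r).filter (fun x => decide (p < x)) := by
                simp [hfi]
              rw [hred, hflt]
              simp [pvBox]
        · by_cases hcs : c ∈ pvStops
          · have hS : pvStartsOf ((i, c) :: r) = pvStartsOf r := by simp [pvStartsOf, hc]
            have hP : pvStopsOf ((i, c) :: r) = i :: pvStopsOf r := by simp [pvStopsOf, hcs]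
            have hT : pvTgl none ((i, c) :: r) = pvTgl none r := by simp [pvTgl, hc]
            rw [hT, hS, hP, ihf]
            cases hst : pvStartsOf r with
            | nil => simp [pvPairOrfs]
            | cons s ss =>
                have his : i < s := hstartsgt s (by rw [hst]; exact List.mem_cons_self)
                have hred : pvPairOrfs (s :: ss) (i :: pvStopsOf r)
                    = pvPairOrfs (s :: ss) (pvStopsOf r) := by
                  simp [pvPairOrfs, his]
                rw [hred, ← hst]
          · have hS : pvStartsOf ((i, c) :: r) = pvStartsOf r := by simp [pvStartsOf, hc]
            have hP : pvStopsOf ((i, c) :: r) = pvStopsOf r := by simp [pvStopsOf, hcs]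
            have hT : pvTgl none ((i, c) :: r) = pvTgl none r := by simp [pvTgl, hc]
            rw [hT, hS, hP, ihf]
      · -- the in-sequence case
        intro s0
        by_cases hcs : c ∈ pvStops
        · have hc : c ≠ pvStart := by rintro rfl; revert hcs; decide
          have hS : pvStartsOf ((i, c) :: r) = pvStartsOf r := by simp [pvStartsOf, hc]
          have hP : pvStopsOf ((i, c) :: r) = i :: pvStopsOf r := by simp [pvStopsOf, hcs]
          have hT : pvTgl (some s0) ((i, c) :: r) = (some s0, some i) :: pvTgl none r := by
            simp [pvTgl, hcs]
          have hflt : (pvStartsOf r).filter (fun x => decide (i < x)) = pvStartsOf r :=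
            List.filter_eq_self.mpr (fun x hx => by simpa using hstartsgt x hx)
          rw [hT, hS, hP, ihf]
          simp [hflt]
        · have hT : pvTgl (some s0) ((i, c) :: r) = pvTgl (some s0) r := by
            simp [pvTgl, hcs]
          have hP : pvStopsOf ((i, c) :: r) = pvStopsOf r := by simp [pvStopsOf, hcs]
          by_cases hc : c = pvStart
          · have hS : pvStartsOf ((i, c) :: r) = i :: pvStartsOf r := by
              simp [pvStartsOf, hc]
            rw [hT, hS, hP, iht s0]
            cases hst : pvStopsOf r with
            | nil => rfl
            | cons p ps =>
                have hip : i < p := hstopsgt p (by rw [hst]; exact List.mem_cons_self)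
                have hflt : (i :: pvStartsOf r).filter (fun x => decide (p < x))
                    = (pvStartsOf r).filter (fun x => decide (p < x)) := by
                  simp [show ¬ p < i by omega]
                simp [hflt]
          · have hS : pvStartsOf ((i, c) :: r) = pvStartsOf r := by simp [pvStartsOf, hc]
            rw [hT, hS, hP, iht s0]

theorem pv_max?_append {α : Type} (l : List α) (x : α) (key : α → Int) :
    PySem.List.max? (l ++ [x]) key
    = match PySem.List.max? l key with
      | none => some x
      | some m => if key m < key x then some x else some m := by
  simp only [PySem.List.max?, List.foldl_append, List.foldl_cons, List.foldl_nil]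
  rfl

-- max? commutes with pvBox (pvOrfLength of a boxed pair is B's key)
theorem pv_max?_map_box (l : List (Int × Option Int)) :
    PySem.List.max? (l.map pvBox) pvOrfLength
    = (PySem.List.max? l pvKeyB).map pvBox := by
  induction l using List.reverseRecOn with
  | nil => rfl
  | append_singleton l x ih =>
      rw [List.map_append, List.map_singleton, pv_max?_append, pv_max?_append, ih]
      have hkey : pvOrfLength (pvBox x) = pvKeyB x := by
        cases hx : x.2 <;> simp [pvOrfLength, pvBox, pvKeyB, hx]
      cases hm : PySem.List.max? l pvKeyB with
      | none => rfl
      | some m =>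
          have hkm : pvOrfLength (pvBox m) = pvKeyB m := by
            cases hm2 : m.2 <;> simp [pvOrfLength, pvBox, pvKeyB, hm2]
          simp only [Option.map_some, hkey, hkm]
          by_cases hlt : pvKeyB m < pvKeyB x
          · rw [if_pos hlt, if_pos hlt]; rfl
          · rw [if_neg hlt, if_neg hlt]; rfl

-- per-frame equivalence: B's merge-based frame result vs A's toggle/zip/max pipeline
theorem pv_frame_eq (s : List Char) (frame : Int)
    (hf : frame = 1 ∨ frame = 2 ∨ frame = 3) :
    pvFrameB s frame
    = if pvFindCodons (pvChunkstring s 3 frame) ≠ [] then some (pvMaxOrfByFrame s frame)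
      else none := by
  have hchunk : pvChunkstring s 3 frame
      = (PySem.List.pyRange 0 (PySem.List.len (PySem.List.slice s (some (frame - 1)) none)) 3).map
          (fun i => PySem.List.slice (PySem.List.slice s (some (frame - 1)) none)
            (some i) (some (i + 3))) := by
    unfold pvChunkstring
    refine List.map_congr_left ?_
    intro i _
    rw [show (0 : Int) + i = i by ring, show (3 : Int) + i = i + 3 by ring]
  set codons := (PySem.List.pyRange 0 (PySem.List.len (PySem.List.slice s (some (frame - 1)) none)) 3).map
      (fun i => PySem.List.slice (PySem.List.slice s (some (frame - 1)) none)
        (some i) (some (i + 3))) with hcod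
  -- A's find_codons on these codons is pvTgl, which is the boxed pvPairOrfs
  have hFC : pvFindCodons codons
      = (pvPairOrfs (pvStartsOf (PySem.List.enumerate codons))
          (pvStopsOf (PySem.List.enumerate codons))).map pvBox := by
    have h0 := pv_fold_eq_tgl (PySem.List.enumerate codons) [] [] none rfl
    have h1 : pvFindCodons codons = pvTgl none (PySem.List.enumerate codons) := by
      unfold pvFindCodons
      rw [pv_fold_range_enum0 pvFindStep codons ([], [], false)]
      simpa using h0
    rw [h1]
    exact (pv_tgl_pairs (PySem.List.enumerate codons)
      (PySem.List.pairwise_lt_enumerate codons 0)).1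
  have hpos : pvFindPositions codons
      = (pvStartsOf (PySem.List.enumerate codons), pvStopsOf (PySem.List.enumerate codons)) := rfl
  set orfs := pvPairOrfs (pvStartsOf (PySem.List.enumerate codons))
      (pvStopsOf (PySem.List.enumerate codons)) with horfs
  have hB : pvFrameB s frame
      = match PySem.List.max? orfs pvKeyB with
        | none => none
        | some best =>
            some (match best.2 with
              | none => ((2 : Int), ((0 : Int), (1 : Int)), frame)
              | some t =>
                  (t * 3 + frame + 2 - (best.1 * 3 + frame) + 1,
                   (best.1 * 3 + frame, t * 3 + frame + 2), frame)) := rfl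
  rw [hchunk, hFC, hB]
  cases hm : PySem.List.max? orfs pvKeyB with
  | none =>
      have : orfs = [] := (PySem.List.max?_eq_none_iff _ _).mp hm
      simp [this]
  | some best =>
      have hne : orfs ≠ [] := by
        intro hh
        rw [hh] at hm
        simp [PySem.List.max?] at hm
      have hne2 : orfs.map pvBox ≠ [] := by simpa using hne
      rw [if_pos hne2]
      unfold pvMaxOrfByFrame pvBiggestOrf
      rw [hchunk, hFC, pv_max?_map_box, hm]
      cases hb : best.2 with
      | none =>
          rcases hf with hf | hf | hf <;> subst hf <;>
            simp [pvBox, pvCalcIndexes, hb]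
      | some t =>
          rcases hf with hf | hf | hf <;> subst hf <;>
            simp [pvBox, pvCalcIndexes, hb, Prod.ext_iff] <;> omega

-- ===== VERDICT (by name: the statement is the Claim_ definition above) =====
theorem max_orfs_by_frame_spec : Claim_equal_max_orfs_by_frame := by
  unfold Claim_equal_max_orfs_by_frame Spec_max_orfs_by_frame
  intro sequence _
  unfold max_orfs_by_frame max_orfs_by_frame_alt
  rw [show PySem.List.pyRange 1 4 = [1, 2, 3] from by decide]
  simp only [List.foldl_cons, List.foldl_nil]
  rw [pv_frame_eq sequence.toList 1 (by norm_num),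
      pv_frame_eq sequence.toList 2 (by norm_num),
      pv_frame_eq sequence.toList 3 (by norm_num)]
  by_cases h1 : pvFindCodons (pvChunkstring sequence.toList 3 1) ≠ [] <;>
    by_cases h2 : pvFindCodons (pvChunkstring sequence.toList 3 2) ≠ [] <;>
      by_cases h3 : pvFindCodons (pvChunkstring sequence.toList 3 3) ≠ [] <;>
        simp [h1, h2, h3]
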